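-- pv_equiv track=rewrite | github.com/Lobo2008/LeetCode | 212_Word_Search_II.py | _hasEnoughChar
-- ===== SOURCE A (Python) =====
-- def _hasEnoughChar(board, word):
--     from collections import Counter
--     c_w = Counter(word)
--     c_board = Counter([c for row in board for c in row])
--     for k,v in c_w.items():
--         if c_board[k] < v:
--             return False
--     return True
-- ===== SOURCE B (Python) =====
-- def _hasEnoughChar(board, word):
--     pool = [c for row in board for c in row]
--     for ch in word:
--         try:
--             pool.remove(ch)
--         except ValueError:
--             return False
--     return True
-- ===== Notes on version B (the rewrite author's own statement) =====
-- stated objective: alternative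
-- what changed: B builds no Counter at all: it flattens the board into a pool list and consumes one occurrence per word character with list.remove, failing on the first character that cannot be removed (multiset inclusion by consumption instead of count comparison).
import Mathlib
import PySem

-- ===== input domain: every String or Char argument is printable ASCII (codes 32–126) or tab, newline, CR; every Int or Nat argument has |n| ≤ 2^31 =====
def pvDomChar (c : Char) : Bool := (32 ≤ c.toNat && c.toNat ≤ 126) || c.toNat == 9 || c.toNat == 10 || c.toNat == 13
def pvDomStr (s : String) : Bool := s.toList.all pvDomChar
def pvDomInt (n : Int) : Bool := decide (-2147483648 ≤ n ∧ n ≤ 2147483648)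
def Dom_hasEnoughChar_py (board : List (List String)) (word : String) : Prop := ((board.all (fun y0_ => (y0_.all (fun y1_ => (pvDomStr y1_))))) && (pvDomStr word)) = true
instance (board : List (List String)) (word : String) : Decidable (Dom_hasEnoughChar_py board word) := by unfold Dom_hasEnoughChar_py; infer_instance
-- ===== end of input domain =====

-- B drops the Counter entirely: it flattens the board into a pool and removes one cell per word character (multiset inclusion by consumption); alternative algorithm, return values equal.


-- ===== PORT A =====
-- 'for k,v in c_w.items(): if c_board[k] < v: return False / return True'
def pyA_loop (c_board : PySem.Dict String Int) : List (Char × Int) → Bool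
  | [] => true
  | (k, v) :: rest =>
    if c_board.getD (String.ofList [k]) 0 < v then false else pyA_loop c_board rest

def hasEnoughChar_py (board : List (List String)) (word : String) : Bool :=
  let c_w := PySem.Dict.counter word.toList
  let c_board := PySem.Dict.counter (board.flatMap (fun row => row))
  pyA_loop c_board c_w.items

-- ===== PORT B =====
-- 'for ch in word: try pool.remove(ch) except ValueError: return False / return True'
def pyB_loop : List Char → List String → Bool
  | [], _ => true
  | ch :: ws, pool =>
    match PySem.List.remove? pool (String.ofList [ch]) with
    | none => false
    | some pool' => pyB_loop ws pool'

def hasEnoughChar_py_alt (board : List (List String)) (word : String) : Bool :=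
  let pool := board.flatMap (fun row => row)
  pyB_loop word.toList pool

-- ===== PRECONDITION & SPEC =====
def Spec_hasEnoughChar_py (board : List (List String)) (word : String) (out : Bool) : Prop := out = hasEnoughChar_py_alt board word
instance (board : List (List String)) (word : String) (out : Bool) : Decidable (Spec_hasEnoughChar_py board word out) := by unfold Spec_hasEnoughChar_py; infer_instance

-- ===== CLAIM (what is proved, stated in full; the proofs are below) =====
def Claim_equal_hasEnoughChar_py : Prop := ∀ (board : List (List String)) (word : String), Dom_hasEnoughChar_py board word → Spec_hasEnoughChar_py board word (hasEnoughChar_py board word)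

-- ===== LEMMAS AND PROOFS =====

theorem mk_single_inj {c d : Char} (h : String.ofList [c] = String.ofList [d]) : c = d := by
  have := congrArg String.toList h
  simp at this; exact this

-- A's loop is the pointwise count check over the items it visits.
theorem pyA_loop_true_iff (d : PySem.Dict String Int) (items : List (Char × Int)) :
    pyA_loop d items = true ↔ ∀ p ∈ items, ¬ (d.getD (String.ofList [p.1]) 0 < p.2) := by
  induction items with
  | nil => simp [pyA_loop]
  | cons p rest ih =>
      obtain ⟨k, v⟩ := p
      by_cases h : d.getD (String.ofList [k]) 0 < v
      · simp [pyA_loop, h]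
      · simp only [pyA_loop, if_neg h, ih, List.mem_cons]
        constructor
        · intro hr p hp
          rcases hp with hp | hp
          · subst hp; exact h
          · exact hr p hp
        · intro hr p hp; exact hr p (Or.inr hp)

-- B's consumption loop succeeds iff the word's multiset of characters fits in the pool.
theorem pyB_loop_true_iff (ws : List Char) : ∀ (pool : List String),
    pyB_loop ws pool = true ↔ ∀ c : Char, ws.count c ≤ pool.count (String.ofList [c]) := by
  induction ws with
  | nil => intro pool; simp [pyB_loop]
  | cons ch ws ih =>
      intro pool
      by_cases hmem : String.ofList [ch] ∈ pool
      · have hrem : PySem.List.remove? pool (String.ofList [ch]) = some (pool.erase (String.ofList [ch])) :=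
          PySem.List.remove?_eq_some_erase pool _ hmem
        have hpos : 0 < pool.count (String.ofList [ch]) := List.count_pos_iff.mpr hmem
        simp only [pyB_loop, hrem, ih]
        constructor
        · intro h c
          have hc := h c
          by_cases hcc : c = ch
          · subst hcc
            rw [List.count_erase_self] at hc
            simp only [List.count_cons_self]
            omega
          · rw [List.count_erase_of_ne (fun he => hcc (mk_single_inj he))] at hc
            have hne : ch ≠ c := fun he => hcc he.symm
            simp only [List.count_cons, beq_iff_eq, if_neg hne, add_zero]
            exact hc
        · intro h c
          have hc := h c
          by_cases hcc : c = ch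
          · subst hcc
            rw [List.count_erase_self]
            simp only [List.count_cons_self] at hc
            omega
          · rw [List.count_erase_of_ne (fun he => hcc (mk_single_inj he))]
            have hne : ch ≠ c := fun he => hcc he.symm
            simp only [List.count_cons, beq_iff_eq, if_neg hne, add_zero] at hc
            exact hc
      · have hrem : PySem.List.remove? pool (String.ofList [ch]) = none :=
          (PySem.List.remove?_eq_none_iff pool _).mpr hmem
        have hz : pool.count (String.ofList [ch]) = 0 := List.count_eq_zero.mpr hmem
        simp only [pyB_loop, hrem]
        constructor
        · intro h; cases h
        · intro h
          have := h ch
          simp [List.count_cons_self, hz] at this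

-- ===== VERDICT (by name: the statement is the Claim_ definition above) =====
theorem hasEnoughChar_py_spec : Claim_equal_hasEnoughChar_py := by
  intro board word _
  unfold Spec_hasEnoughChar_py hasEnoughChar_py hasEnoughChar_py_alt
  set flat := board.flatMap (fun row => row) with hflat
  have hA := pyA_loop_true_iff (PySem.Dict.counter flat) (PySem.Dict.counter word.toList).items
  have hB := pyB_loop_true_iff word.toList flat
  rw [Bool.eq_iff_iff, hA, hB]
  simp only [PySem.Dict.items_counter, List.mem_map, PySem.Dict.getD_counter]
  constructor
  · intro h c
    by_cases hc : c ∈ word.toList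
    · have hmem : c ∈ PySem.Set.ofList word.toList := by
        rw [PySem.Set.mem_ofList]; exact hc
      have := h (c, (word.toList.count c : Int)) ⟨c, hmem, rfl⟩
      simp only [not_lt] at this ⊢
      omega
    · simp [List.count_eq_zero.mpr hc]
  · rintro h p ⟨c, hmem, rfl⟩
    have := h c
    simp only [not_lt]
    exact_mod_cast this
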